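-- pv_equiv track=rewrite | github.com/johnson11144/my_IS | hw1/60947005S_hw1/OTP.py | collect_col
-- ===== SOURCE A (Python) =====
-- def collect_col(text):  # 收集所有同一行的字
--     each_col = []
--     for i in range(0, len(text[-1]), 2):
--         tmp = []
--         for c in text:
--             add = None
--             if len(c) >= i+2:
--                 if c[i:i+2] not in tmp:
--                     add = c[i:i+2]
--             tmp.append(add)
--         each_col.append(tmp)
--     return each_col
-- ===== SOURCE B (Python) =====
-- def _step(c, i, out, seen):
--     # advance one column's state (emitted-so-far, seen-set) by one row
--     if len(c) >= i + 2:
--         v = c[i:i+2]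
--         if v not in seen:
--             return (out + [v], seen | {v})
--     return (out + [None], seen)
--
-- def collect_col(text):
--     # Row-major single pass: thread one (output, seen) state per column
--     # through the rows, instead of A's column-major nested rescans.
--     cols = list(range(0, len(text[-1]), 2))
--     state = [(i, ([], set())) for i in cols]
--     for c in text:
--         state = [(i, _step(c, i, out, seen)) for i, (out, seen) in state]
--     return [out for _, (out, _) in state]
-- ===== Notes on version B (the rewrite author's own statement) =====
-- stated objective: alternative
-- what changed: Interchanges the loops: a single row-major pass threads one (output, seen-set) state per column through the rows, instead of A's column-major nested loops that rescan the partially-built result list for membership.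
import Mathlib
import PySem

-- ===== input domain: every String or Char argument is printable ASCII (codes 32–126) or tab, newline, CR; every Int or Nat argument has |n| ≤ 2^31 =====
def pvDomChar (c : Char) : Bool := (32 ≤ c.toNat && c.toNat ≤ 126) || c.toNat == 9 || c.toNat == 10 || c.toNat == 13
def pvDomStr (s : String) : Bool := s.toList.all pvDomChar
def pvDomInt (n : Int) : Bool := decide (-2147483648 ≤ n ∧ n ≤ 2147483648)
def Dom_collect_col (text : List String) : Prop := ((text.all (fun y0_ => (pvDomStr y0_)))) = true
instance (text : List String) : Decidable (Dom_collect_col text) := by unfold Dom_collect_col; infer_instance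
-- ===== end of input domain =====

-- B makes a single row-major pass threading per-column (output, seen-set) states;
-- A nests column-major loops rescanning the partial result. Return values proved equal on nonempty input.

-- ===== PORT A =====
def collect_col (text : List String) : List (List (Option String)) :=
  (PySem.List.pyRange 0 (PySem.Str.len ((PySem.List.pyGet? text (-1)).getD "")) 2).foldl
    (fun each_col i =>
      each_col ++
        [text.foldl
          (fun tmp c =>
            let add : Option String :=
              if i + 2 ≤ PySem.Str.len c then
                (if (some (PySem.Str.slice c (some i) (some (i + 2)))) ∈ tmp then none
                 else some (PySem.Str.slice c (some i) (some (i + 2))))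
              else none
            tmp ++ [add])
          []])
    []

-- ===== PORT B =====
-- advance one column's state (emitted-so-far, seen-set) by one row
def pvStep (c : String) (i : Int) (st : List (Option String) × PySem.Set String) :
    List (Option String) × PySem.Set String :=
  if i + 2 ≤ PySem.Str.len c then
    let v := PySem.Str.slice c (some i) (some (i + 2))
    if PySem.Set.contains st.2 v then (st.1 ++ [none], st.2)
    else (st.1 ++ [some v], PySem.Set.add st.2 v)
  else (st.1 ++ [none], st.2)

def collect_col_alt (text : List String) : List (List (Option String)) :=
  let cols := PySem.List.pyRange 0 (PySem.Str.len ((PySem.List.pyGet? text (-1)).getD "")) 2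
  let state := cols.map (fun i => (i, (([] : List (Option String)), PySem.Set.empty)))
  let final := text.foldl
    (fun st c => st.map (fun p => (p.1, pvStep c p.1 p.2))) state
  final.map (fun p => p.2.1)

-- ===== PRECONDITION & SPEC =====
-- Python A evaluates text[-1]; on the empty list it raises IndexError, hence excluded.
def Pre_collect_col (text : List String) : Prop := text ≠ []
instance (text : List String) : Decidable (Pre_collect_col text) := by
  unfold Pre_collect_col; infer_instance
def pvWitness_collect_col : List String := ["abcd", "ab", "abxy"]

def Spec_collect_col (text : List String) (out : List (List (Option String))) : Prop :=
  out = collect_col_alt text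
instance (text : List String) (out : List (List (Option String))) :
    Decidable (Spec_collect_col text out) := by unfold Spec_collect_col; infer_instance

-- ===== CLAIM (what is proved, stated in full; the proofs are below) =====
def Claim_equal_collect_col : Prop :=
  ∀ (text : List String), Dom_collect_col text → Pre_collect_col text →
    Spec_collect_col text (collect_col text)

-- ===== LEMMAS AND PROOFS =====

-- Loop interchange: folding a pointwise map over the rows equals mapping,
-- per list element, the fold over the rows.
theorem pv_fold_map {α β : Type} (g : β → α → α) (rows : List β) (st : List α) :
    rows.foldl (fun st c => st.map (g c)) st
      = st.map (fun x => rows.foldl (fun x c => g c x) x) := by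
  induction rows generalizing st with
  | nil => simp
  | cons c rest ih =>
    simp only [List.foldl_cons]
    rw [ih, List.map_map]
    rfl

-- Threading the column index through the pair is invariant: it factors out.
theorem pv_pair_fold (rows : List String) (i : Int)
    (st : List (Option String) × PySem.Set String) :
    rows.foldl (fun x c => (x.1, pvStep c x.1 x.2)) (i, st)
      = (i, rows.foldl (fun st c => pvStep c i st) st) := by
  induction rows generalizing st with
  | nil => rfl
  | cons c rest ih => simp only [List.foldl_cons]; exact ih _

-- A's inner column loop equals B's per-column fold over the rows, under the
-- invariant that the seen-set holds exactly the strings already emitted.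
theorem pv_inner (i : Int) (cs : List String) (tmp : List (Option String))
    (seen : PySem.Set String) (h : ∀ s : String, some s ∈ tmp ↔ s ∈ seen) :
    cs.foldl
      (fun tmp c =>
        tmp ++
          [if i + 2 ≤ PySem.Str.len c then
             (if (some (PySem.Str.slice c (some i) (some (i + 2)))) ∈ tmp then none
              else some (PySem.Str.slice c (some i) (some (i + 2))))
           else none]) tmp
    = (cs.foldl (fun st c => pvStep c i st) (tmp, seen)).1 := by
  induction cs generalizing tmp seen with
  | nil => simp
  | cons c rest ih =>
    have hkeepn : ∀ t : String, some t ∈ tmp ++ [(none : Option String)] ↔ t ∈ seen := by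
      intro t
      simp only [List.mem_append, List.mem_singleton]
      constructor
      · rintro (ht | ht)
        · exact (h t).mp ht
        · exact absurd ht (by simp)
      · intro ht; exact Or.inl ((h t).mpr ht)
    simp only [List.foldl_cons]
    by_cases hc : i + 2 ≤ PySem.Str.len c
    · by_cases hm : (some (PySem.Str.slice c (some i) (some (i + 2)))) ∈ tmp
      · simp only [if_pos hc, if_pos hm]
        have hstep : pvStep c i (tmp, seen) = (tmp ++ [none], seen) := by
          unfold pvStep; rw [if_pos hc]; simp [(h _).mp hm]
        rw [ih (tmp ++ [none]) seen hkeepn, hstep]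
      · simp only [if_pos hc, if_neg hm]
        rw [ih (tmp ++ [some (PySem.Str.slice c (some i) (some (i + 2)))])
            (PySem.Set.add seen (PySem.Str.slice c (some i) (some (i + 2)))) (by
          intro t
          simp only [List.mem_append, List.mem_singleton, Option.some.injEq,
            PySem.Set.mem_add]
          constructor
          · rintro (ht | ht)
            · exact Or.inl ((h t).mp ht)
            · exact Or.inr ht
          · rintro (ht | ht)
            · exact Or.inl ((h t).mpr ht)
            · exact Or.inr ht)]
        have hnin : PySem.Str.slice c (some i) (some (i + 2)) ∉ seen :=
          fun hx => hm ((h _).mpr hx)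
        have hstep : pvStep c i (tmp, seen)
            = (tmp ++ [some (PySem.Str.slice c (some i) (some (i + 2)))],
               PySem.Set.add seen (PySem.Str.slice c (some i) (some (i + 2)))) := by
          unfold pvStep; rw [if_pos hc]
          simp [show PySem.Str.slice c (some i) (some (i + 2)) ∉ seen from
            fun hx => hm ((h _).mpr hx)]
        rw [hstep]
    · simp only [if_neg hc]
      have hstep : pvStep c i (tmp, seen) = (tmp ++ [none], seen) := by
        unfold pvStep; rw [if_neg hc]
      rw [ih (tmp ++ [none]) seen hkeepn, hstep]

-- A's outer accumulate-by-append fold over any index list equals a map of per-column folds.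
theorem pv_outer (text : List String) (r : List Int) (acc : List (List (Option String))) :
    r.foldl
      (fun each_col i =>
        each_col ++
          [text.foldl
            (fun tmp c =>
              tmp ++
                [if i + 2 ≤ PySem.Str.len c then
                   (if (some (PySem.Str.slice c (some i) (some (i + 2)))) ∈ tmp then none
                    else some (PySem.Str.slice c (some i) (some (i + 2))))
                 else none])
            []]) acc
    = acc ++ r.map (fun i =>
        (text.foldl (fun st c => pvStep c i st)
          (([] : List (Option String)), PySem.Set.empty)).1) := by
  induction r generalizing acc with
  | nil => simp
  | cons i rest ih =>
    simp only [List.foldl_cons, List.map_cons]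
    rw [ih, pv_inner i text [] PySem.Set.empty (by intro s; simp [PySem.Set.empty])]
    simp

-- ===== VERDICT (by name: the statement is the Claim_ definition above) =====
theorem collect_col_spec : Claim_equal_collect_col := by
  intro text _ _
  unfold Spec_collect_col collect_col collect_col_alt
  dsimp only []
  rw [pv_fold_map, List.map_map, List.map_map, pv_outer]
  simp only [List.nil_append]
  exact List.map_congr_left (fun i _ => by
    simp only [Function.comp_apply, pv_pair_fold])
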